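-- pv_equiv track=rewrite | github.com/mhun11522/bybit-copybot-pro | app/signals/processor.py | _is_valid_symbol
-- ===== SOURCE A (Python) =====
-- def _is_valid_symbol(symbol: str) -> bool:
--     """Validate if symbol is likely a valid trading pair."""
--     if len(symbol) < 4 or len(symbol) > 12:
--         return False
--
--     # Must contain USDT, BTC, or ETH
--     valid_suffixes = ['USDT', 'BTC', 'ETH']
--     if not any(symbol.endswith(suffix) for suffix in valid_suffixes):
--         return False
--
--     # Must have at least 2 characters before suffix
--     for suffix in valid_suffixes:
--         if symbol.endswith(suffix) and len(symbol) >= len(suffix) + 2: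
--             return True
--
--     return False
-- ===== SOURCE B (Python) =====
-- import re
--
-- _SYMBOL_RE = re.compile(r'(?s)^.{2,}(?:USDT|BTC|ETH)\Z')
--
-- def _is_valid_symbol(symbol: str) -> bool:
--     """Validate if symbol is likely a valid trading pair."""
--     return len(symbol) <= 12 and bool(_SYMBOL_RE.match(symbol))
-- ===== Notes on version B (the rewrite author's own statement) =====
-- stated objective: idiomatic
-- what changed: Replaced the length bounds, the any-endswith scan and the second suffix loop by a single precompiled regular expression ^.{2,}(?:USDT|BTC|ETH)$ (DOTALL) plus the len<=12 bound.
import Mathlib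
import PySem

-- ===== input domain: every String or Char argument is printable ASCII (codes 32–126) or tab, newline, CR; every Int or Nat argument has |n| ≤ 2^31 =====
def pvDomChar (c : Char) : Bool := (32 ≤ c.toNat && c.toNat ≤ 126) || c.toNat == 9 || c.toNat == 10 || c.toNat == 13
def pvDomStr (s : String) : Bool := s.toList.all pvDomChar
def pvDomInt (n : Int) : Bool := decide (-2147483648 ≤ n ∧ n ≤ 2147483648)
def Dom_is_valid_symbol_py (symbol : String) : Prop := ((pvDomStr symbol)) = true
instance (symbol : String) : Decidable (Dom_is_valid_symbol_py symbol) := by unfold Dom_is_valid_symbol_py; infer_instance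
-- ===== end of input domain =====

-- ===== PORT A =====
-- B replaces A's bound checks + two suffix scans by one regex match; equivalence of return values proved below.
def is_valid_symbol_py (symbol : String) : Bool :=
  if PySem.Str.len symbol < 4 || PySem.Str.len symbol > 12 then false
  else
    -- valid_suffixes = ['USDT', 'BTC', 'ETH']
    let valid_suffixes : List String := ["USDT", "BTC", "ETH"]
    if !(valid_suffixes.any (fun suffix => PySem.Str.endswith symbol suffix)) then false
    else
      -- for suffix in valid_suffixes: if symbol.endswith(suffix) and len(symbol) >= len(suffix)+2: return True
      valid_suffixes.any (fun suffix =>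
        PySem.Str.endswith symbol suffix && PySem.Str.len suffix + 2 ≤ PySem.Str.len symbol)

-- ===== PORT B =====
-- Hand port of the regex r'(?s)^.{2,}(?:USDT|BTC|ETH)\Z': it matches exactly when the string
-- ends with one of the suffixes preceded by at least 2 characters (DOTALL, \Z = absolute end);
-- exact because the alternation is literal and .{2,} matches any 2+ code points.
def is_valid_symbol_py_alt (symbol : String) : Bool :=
  PySem.Str.len symbol ≤ 12 &&
    ((PySem.Str.endswith symbol "USDT" && 6 ≤ PySem.Str.len symbol) ||
     (PySem.Str.endswith symbol "BTC" && 5 ≤ PySem.Str.len symbol) ||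
     (PySem.Str.endswith symbol "ETH" && 5 ≤ PySem.Str.len symbol))

-- ===== PRECONDITION & SPEC =====
def Spec_is_valid_symbol_py (symbol : String) (out : Bool) : Prop := out = is_valid_symbol_py_alt symbol
instance (symbol : String) (out : Bool) : Decidable (Spec_is_valid_symbol_py symbol out) := by unfold Spec_is_valid_symbol_py; infer_instance

-- ===== CLAIM (what is proved, stated in full; the proofs are below) =====
def Claim_equal_is_valid_symbol_py : Prop := ∀ (symbol : String), Dom_is_valid_symbol_py symbol → Spec_is_valid_symbol_py symbol (is_valid_symbol_py symbol)

-- ===== LEMMAS AND PROOFS =====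

-- a suffix of length k can only be a suffix of a string of length ≥ k
theorem endswith_len_le (s p : List Char) (h : PySem.Chars.endswith s p = true) :
    p.length ≤ s.length := by
  rw [PySem.Chars.endswith_iff] at h
  exact h.length_le

-- ===== VERDICT (by name: the statement is the Claim_ definition above) =====
theorem is_valid_symbol_py_spec : Claim_equal_is_valid_symbol_py := by
  intro symbol _
  unfold Spec_is_valid_symbol_py is_valid_symbol_py is_valid_symbol_py_alt
  have hU' : PySem.Chars.endswith symbol.toList ['U','S','D','T'] = true → 4 ≤ symbol.toList.length :=
    fun h => by simpa using endswith_len_le _ _ h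
  have hB' : PySem.Chars.endswith symbol.toList ['B','T','C'] = true → 3 ≤ symbol.toList.length :=
    fun h => by simpa using endswith_len_le _ _ h
  have hE' : PySem.Chars.endswith symbol.toList ['E','T','H'] = true → 3 ≤ symbol.toList.length :=
    fun h => by simpa using endswith_len_le _ _ h
  cases hU : PySem.Str.endswith symbol "USDT" <;>
  cases hB : PySem.Str.endswith symbol "BTC" <;>
  cases hE : PySem.Str.endswith symbol "ETH" <;>
    simp_all [List.any, PySem.Str.len_eq, String.length_toList] <;>
    (rw [Bool.eq_iff_iff]; simp only [Bool.and_eq_true, Bool.or_eq_true, Bool.not_eq_true', decide_eq_true_eq,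
       decide_eq_false_iff_not]; omega)
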